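-- pv_equiv track=rewrite | github.com/pypi-data/pypi-mirror-9 | packages/pynhost/pynhost-0.4.8.zip/pynhost-0.4.8/pynhost/ruleparser.py | surround_previous_word
-- ===== SOURCE A (Python) =====
-- def surround_previous_word(input_str):
--     '''
--     Surround last word in string with parentheses. If last non-whitespace character
--     is delimiter, do nothing
--     '''
--     start = None
--     end = None
--     for i, char in enumerate(reversed(input_str)):
--         if start is None:
--             if char in '{}()[]<>?|':
--                 return input_str
--             elif char != ' ':
--                 start = i
--         else:
--             if char in '{}()[]<>?| ':
--                 end = i
--                 break
--     if start is None:
--         return input_str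
--     if end is None:
--         end = len(input_str)
--     new_str = ''
--     for i, char in enumerate(reversed(input_str)):
--         if char == ' ' and i + 1 == start:
--             continue
--         if i == start:
--             new_str += ') '
--         elif i == end:
--             new_str += '('
--         new_str += char
--     if end == len(input_str):
--         new_str += '('
--     return new_str[::-1]
-- ===== SOURCE B (Python) =====
-- def surround_previous_word(input_str):
--     '''
--     Surround last word in string with parentheses. If last non-whitespace character
--     is delimiter, do nothing
--     '''
--     delims = '{}()[]<>?|'
--     n = len(input_str)
--     e = n
--     while e > 0 and input_str[e-1] == ' ':
--         e -= 1
--     if e == 0 or input_str[e-1] in delims: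
--         return input_str
--     w = e
--     while w > 0 and input_str[w-1] not in delims and input_str[w-1] != ' ':
--         w -= 1
--     return input_str[:w] + '(' + input_str[w:e] + ' )' + ' ' * (n - e - 1)
-- ===== Notes on version B (the rewrite author's own statement) =====
-- stated objective: simpler
-- what changed: A scans the reversed string twice (one enumerate pass to find start/end indices, one to rebuild the result character by character in reverse); B computes the trailing-space count and the word-start index with two backward index scans and returns a single forward slice concatenation.
import Mathlib
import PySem

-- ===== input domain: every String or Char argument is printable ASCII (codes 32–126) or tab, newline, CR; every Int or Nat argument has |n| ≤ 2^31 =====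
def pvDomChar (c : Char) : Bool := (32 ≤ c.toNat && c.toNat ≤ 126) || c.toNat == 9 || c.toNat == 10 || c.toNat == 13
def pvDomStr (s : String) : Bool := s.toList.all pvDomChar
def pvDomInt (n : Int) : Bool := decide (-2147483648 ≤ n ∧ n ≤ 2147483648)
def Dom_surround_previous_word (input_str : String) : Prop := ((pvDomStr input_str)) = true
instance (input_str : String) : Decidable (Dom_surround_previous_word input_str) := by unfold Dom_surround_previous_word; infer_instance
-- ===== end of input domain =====

-- B replaces A's two reversed-index passes and reversed-buffer rebuild by forward index
-- scans and plain slicing/concatenation (objective: simpler).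

-- ===== PORT A =====
def pvDelims : List Char := ['{', '}', '(', ')', '[', ']', '<', '>', '?', '|']

-- first loop of A over reversed(input_str): outer `none` = early `return input_str`
def aLoop1 : List Char → Nat → Option Nat → Option (Option Nat × Option Nat)
  | [], _, start => some (start, none)
  | c :: cs, i, none =>
      if pvDelims.contains c then none
      else if c ≠ ' ' then aLoop1 cs (i + 1) (some i)
      else aLoop1 cs (i + 1) none
  | c :: cs, i, some st =>
      if pvDelims.contains c || c == ' ' then some (some st, some i)
      else aLoop1 cs (i + 1) (some st)

-- second loop of A: rebuild new_str (as List Char) over reversed(input_str)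
def aLoop2 : List Char → Nat → Nat → Nat → List Char → List Char
  | [], _, _, _, acc => acc
  | c :: cs, i, st, en, acc =>
      if c == ' ' && i + 1 == st then aLoop2 cs (i + 1) st en acc
      else
        let acc' := if i == st then acc ++ [')', ' ']
                    else if i == en then acc ++ ['('] else acc
        aLoop2 cs (i + 1) st en (acc' ++ [c])

def surround_previous_word (input_str : String) : String :=
  let s := input_str.toList
  let rev := s.reverse
  match aLoop1 rev 0 none with
  | none => input_str
  | some (none, _) => input_str
  | some (some st, endOpt) =>
      let en := endOpt.getD s.length
      let newStr := aLoop2 rev 0 st en []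
      let newStr := if en == s.length then newStr ++ ['('] else newStr
      String.mk newStr.reverse

-- ===== PORT B =====
-- `while e > 0 and input_str[e-1] == ' ': e -= 1`
def bTrimEnd (s : List Char) : Nat → Nat
  | 0 => 0
  | e + 1 => if s.getD e ' ' == ' ' then bTrimEnd s e else e + 1

-- `while w > 0 and input_str[w-1] not in delims and input_str[w-1] != ' ': w -= 1`
def bWordStart (s : List Char) : Nat → Nat
  | 0 => 0
  | w + 1 =>
      let c := s.getD w ' '
      if pvDelims.contains c || c == ' ' then w + 1 else bWordStart s w

def surround_previous_word_alt (input_str : String) : String :=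
  let s := input_str.toList
  let n := s.length
  let e := bTrimEnd s n
  if e == 0 then input_str
  else if pvDelims.contains (s.getD (e - 1) ' ') then input_str
  else
    let w := bWordStart s e
    String.mk (s.take w ++ '(' :: ((s.drop w).take (e - w) ++ ' ' :: ')' :: List.replicate (n - e - 1) ' '))

-- ===== PRECONDITION & SPEC =====
def Spec_surround_previous_word (input_str : String) (out : String) : Prop := out = surround_previous_word_alt input_str
instance (input_str : String) (out : String) : Decidable (Spec_surround_previous_word input_str out) := by unfold Spec_surround_previous_word; infer_instance

-- ===== CLAIM (what is proved, stated in full; the proofs are below) =====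
def Claim_equal_surround_previous_word : Prop := ∀ (input_str : String), Dom_surround_previous_word input_str → Spec_surround_previous_word input_str (surround_previous_word input_str)

-- ===== LEMMAS AND PROOFS =====
-- A-side segment lemmas
theorem aLoop1_spaces (sp : List Char) (h : ∀ c ∈ sp, c = ' ') (l : List Char) (i : Nat) :
    aLoop1 (sp ++ l) i none = aLoop1 l (i + sp.length) none := by
  induction sp generalizing i with
  | nil => simp
  | cons c cs ih =>
    have hc := h c (by simp); subst hc
    simp only [List.cons_append, aLoop1]
    rw [if_neg (by decide), if_neg (by simp), ih (fun c hc => h c (by simp [hc])) (i+1)]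
    congr 1
    simp; omega

theorem aLoop1_nonstop (l2 : List Char) (h : ∀ c ∈ l2, (pvDelims.contains c || c == ' ') = false)
    (l : List Char) (i st : Nat) :
    aLoop1 (l2 ++ l) i (some st) = aLoop1 l (i + l2.length) (some st) := by
  induction l2 generalizing i with
  | nil => simp
  | cons c cs ih =>
    simp only [List.cons_append, aLoop1]
    have hc := h c (by simp)
    simp only [hc, Bool.false_eq_true, if_false]
    rw [ih (fun c hc => h c (by simp [hc])) (i+1)]
    congr 1
    simp; omega

theorem aLoop2_spaces (k : Nat) (l : List Char) (st en : Nat) (hst : st ≤ en) :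
    ∀ i acc, i + k = st →
    aLoop2 (List.replicate k ' ' ++ l) i st en acc
      = aLoop2 l st st en (acc ++ List.replicate (k - 1) ' ') := by
  induction k with
  | zero =>
    intro i acc h
    simp at h
    simp [h]
  | succ k ih =>
    intro i acc h
    simp only [List.replicate_succ, List.cons_append, aLoop2]
    by_cases hk : k = 0
    · subst hk
      have h1 : (i + 1 == st) = true := by simp; omega
      have h2 : i + 1 = st := by omega
      simp [h1, h2]
    · have h1 : (i + 1 == st) = false := by simp; omega
      have h2 : (i == st) = false := by simp; omega
      have h3 : (i == en) = false := by simp; omega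
      simp only [h1, Bool.and_false, Bool.false_eq_true, if_false, h2, h3]
      rw [ih (i+1) (acc ++ [' ']) (by omega)]
      have hrep : List.replicate (k + 1 - 1) ' ' = ' ' :: List.replicate (k - 1) ' ' := by
        rw [show k + 1 - 1 = (k - 1) + 1 from by omega, List.replicate_succ]
      rw [hrep]
      simp

theorem aLoop2_mid (l2 : List Char) (l : List Char) (st en : Nat) :
    ∀ i acc, st < i → i + l2.length ≤ en →
    aLoop2 (l2 ++ l) i st en acc = aLoop2 l (i + l2.length) st en (acc ++ l2) := by
  induction l2 with
  | nil => intro i acc _ _; simp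
  | cons c cs ih =>
    intro i acc hlo hhi
    simp only [List.cons_append, aLoop2]
    have h1 : (i + 1 == st) = false := by simp; omega
    have h2 : (i == st) = false := by simp; omega
    have h3 : (i == en) = false := by simp at hhi ⊢; omega
    simp only [h1, Bool.and_false, Bool.false_eq_true, if_false, h2, h3]
    rw [ih (i+1) (acc ++ [c]) (by omega) (by simp at hhi ⊢; omega)]
    congr 1
    · simp; omega
    · simp

theorem aLoop2_after (l2 : List Char) (st en : Nat) :
    ∀ i acc, st < i → en < i →
    aLoop2 l2 i st en acc = acc ++ l2 := by
  induction l2 with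
  | nil => intro i acc _ _; simp [aLoop2]
  | cons c cs ih =>
    intro i acc h1 h2
    simp only [aLoop2]
    have g1 : (i + 1 == st) = false := by simp; omega
    have g2 : (i == st) = false := by simp; omega
    have g3 : (i == en) = false := by simp; omega
    simp only [g1, Bool.and_false, Bool.false_eq_true, if_false, g2, g3]
    rw [ih (i+1) (acc ++ [c]) (by omega) (by omega)]
    simp
-- getD helpers
theorem getD_at (u v : List Char) (c d : Char) : (u ++ c :: v).getD u.length d = c := by
  simp [List.getD_eq_getElem?_getD, List.getElem?_append_right (Nat.le_refl u.length)]

theorem getD_after (u v : List Char) (j : Nat) (d : Char) (h : j < v.length) :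
    (u ++ v).getD (u.length + j) d = v[j] := by
  simp [List.getD_eq_getElem?_getD, List.getElem?_append_right (Nat.le_add_right u.length j),
    List.getElem?_eq_getElem h]

-- B-side lemmas
theorem bTrimEnd_all (s : List Char) (h : ∀ x ∈ s, x = ' ') : ∀ e, bTrimEnd s e = 0 := by
  intro e
  induction e with
  | zero => rfl
  | succ e ih =>
    have hg : s.getD e ' ' = ' ' := by
      rcases hx : s[e]? with _ | y
      · simp [List.getD_eq_getElem?_getD, hx]
      · have : y ∈ s := List.mem_of_getElem? hx
        simp [List.getD_eq_getElem?_getD, hx, h y this]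
    rw [bTrimEnd, if_pos (show (s.getD e ' ' == ' ') = true by rw [hg]; rfl)]
    exact ih

theorem bTrimEnd_upper (u : List Char) (c : Char) (t : Nat) :
    ∀ j, j ≤ t → bTrimEnd (u ++ c :: List.replicate t ' ') (u.length + 1 + j)
      = bTrimEnd (u ++ c :: List.replicate t ' ') (u.length + 1) := by
  intro j
  induction j with
  | zero => intro _; rfl
  | succ j ih =>
    intro hj
    have hg : (u ++ c :: List.replicate t ' ').getD (u.length + 1 + j) ' ' = ' ' := by
      have h1 : u.length + 1 + j = (u ++ [c]).length + j := by simp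
      have h2 : u ++ c :: List.replicate t ' ' = (u ++ [c]) ++ List.replicate t ' ' := by simp
      rw [h1, h2, getD_after _ _ j ' ' (by simpa using hj)]
      simp
    show bTrimEnd _ ((u.length + 1 + j) + 1) = _
    rw [bTrimEnd, if_pos (show ((u ++ c :: List.replicate t ' ').getD (u.length + 1 + j) ' ' == ' ') = true by rw [hg]; rfl), ih (by omega)]

theorem bTrimEnd_hit (u : List Char) (c : Char) (x : List Char) (hc : (c == ' ') = false) :
    bTrimEnd (u ++ c :: x) (u.length + 1) = u.length + 1 := by
  rw [bTrimEnd, if_neg (show ¬((u ++ c :: x).getD u.length ' ' == ' ') = true by rw [getD_at]; simp [hc])]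

theorem bWordStart_word (pre word x : List Char)
    (hw : ∀ c ∈ word, (pvDelims.contains c || c == ' ') = false) :
    ∀ k, k ≤ word.length → bWordStart (pre ++ (word ++ x)) (pre.length + k)
      = bWordStart (pre ++ (word ++ x)) pre.length := by
  intro k
  induction k with
  | zero => intro _; rfl
  | succ k ih =>
    intro hk
    have hk' : k < word.length := by omega
    have hg : (pre ++ (word ++ x)).getD (pre.length + k) ' ' = word[k] := by
      rw [getD_after _ _ k ' ' (by simp; omega)]
      exact List.getElem_append_left hk'
    show bWordStart _ ((pre.length + k) + 1) = _
    rw [bWordStart]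
    simp only [hg, hw word[k] (List.getElem_mem hk'), Bool.false_eq_true, if_false]
    exact ih (by omega)

theorem bWordStart_stop (p0 : List Char) (d : Char) (y : List Char)
    (hd : (pvDelims.contains d || d == ' ') = true) :
    bWordStart (p0 ++ d :: y) (p0.length + 1) = p0.length + 1 := by
  rw [bWordStart]
  simp only [getD_at, hd, if_true]
theorem core_allspace (input_str : String) (h : ∀ x ∈ input_str.toList, x = ' ') :
    surround_previous_word input_str = surround_previous_word_alt input_str := by
  have ha : aLoop1 input_str.toList.reverse 0 none = some (none, none) := by
    have := aLoop1_spaces input_str.toList.reverse (by simpa using h) [] 0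
    simpa [aLoop1] using this
  have hb : bTrimEnd input_str.toList input_str.toList.length = 0 := bTrimEnd_all _ h _
  unfold surround_previous_word surround_previous_word_alt
  simp only [ha, hb]
  rfl

theorem core_main (input_str : String) (t : Nat) (c : Char) (wr pr : List Char)
    (hs : input_str.toList = pr.reverse ++ wr.reverse ++ c :: List.replicate t ' ')
    (hc2 : (c == ' ') = false)
    (hwr : ∀ x ∈ wr, (pvDelims.contains x || x == ' ') = false)
    (hpr : ∀ d pr', pr = d :: pr' → (pvDelims.contains d || d == ' ') = true) :
    surround_previous_word input_str = surround_previous_word_alt input_str := by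
  have hcne : c ≠ ' ' := by simpa using hc2
  have hrev : input_str.toList.reverse = List.replicate t ' ' ++ (c :: (wr ++ pr)) := by
    simp [hs]
  have hu : input_str.toList = (pr.reverse ++ wr.reverse) ++ c :: List.replicate t ' ' := by
    simp [hs]
  have hlen : input_str.toList.length = (pr.reverse ++ wr.reverse).length + 1 + t := by
    rw [hu]; simp; omega
  have he : bTrimEnd input_str.toList input_str.toList.length
      = (pr.reverse ++ wr.reverse).length + 1 := by
    rw [hlen]
    conv_lhs => rw [hu]
    rw [bTrimEnd_upper _ c t t le_rfl, bTrimEnd_hit _ c _ hc2]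
  have hg : input_str.toList.getD ((pr.reverse ++ wr.reverse).length + 1 - 1) ' ' = c := by
    conv_lhs => rw [hu]
    simpa using getD_at (pr.reverse ++ wr.reverse) _ c ' '
  have hstep1 : aLoop1 input_str.toList.reverse 0 none = aLoop1 (c :: (wr ++ pr)) t none := by
    rw [hrev, aLoop1_spaces _ (by simp) _ 0]
    simp
  have c0 : (((pr.reverse ++ wr.reverse).length + 1 : Nat) == 0) = false := by simp
  by_cases hcd : pvDelims.contains c = true
  · -- last non-space char is a delimiter: both return input_str
    have ha : aLoop1 input_str.toList.reverse 0 none = none := by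
      rw [hstep1, aLoop1, if_pos hcd]
    unfold surround_previous_word surround_previous_word_alt
    simp only [ha, he, c0, Bool.false_eq_true, if_false, hg, hcd, if_true]
  · have hcd' : pvDelims.contains c = false := by simpa using hcd
    have ha2 : aLoop1 input_str.toList.reverse 0 none
        = aLoop1 pr (t + 1 + wr.length) (some t) := by
      rw [hstep1, aLoop1]
      simp only [hcd', Bool.false_eq_true, if_false, if_pos hcne]
      rw [aLoop1_nonstop wr hwr pr (t + 1) t]
    -- B's word-start scan
    have hword : ∀ x ∈ wr.reverse ++ [c], (pvDelims.contains x || x == ' ') = false := by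
      intro x hx
      rcases List.mem_append.mp hx with hx | hx
      · exact hwr x (List.mem_reverse.mp hx)
      · simp only [List.mem_singleton] at hx
        simp only [hx, hcd', hc2, Bool.or_self]
    have hsw : input_str.toList
        = pr.reverse ++ ((wr.reverse ++ [c]) ++ List.replicate t ' ') := by simp [hs]
    have hidx : (pr.reverse ++ wr.reverse).length + 1 = pr.reverse.length + (wr.length + 1) := by
      simp; omega
    have hw1 : bWordStart input_str.toList ((pr.reverse ++ wr.reverse).length + 1)
        = bWordStart input_str.toList pr.reverse.length := by
      rw [hidx]
      conv_lhs => rw [hsw]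
      conv_rhs => rw [hsw]
      exact bWordStart_word pr.reverse (wr.reverse ++ [c]) _ hword (wr.length + 1) (by simp)
    have hw : bWordStart input_str.toList ((pr.reverse ++ wr.reverse).length + 1) = pr.length := by
      rw [hw1]
      cases pr with
      | nil => simp [bWordStart]
      | cons d pr' =>
        have hd := hpr d pr' rfl
        have hsd : input_str.toList
            = pr'.reverse ++ d :: ((wr.reverse ++ [c]) ++ List.replicate t ' ') := by
          rw [hsw]; simp
        have hl1 : (d :: pr').reverse.length = pr'.reverse.length + 1 := by simp
        rw [hl1]
        conv_lhs => rw [hsd]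
        rw [bWordStart_stop pr'.reverse d _ hd]
        simp
    -- slicing facts for B
    have htake : input_str.toList.take pr.length = pr.reverse := by
      rw [hsw]
      exact List.take_left' (by simp)
    have hdrop : input_str.toList.drop pr.length
        = (wr.reverse ++ [c]) ++ List.replicate t ' ' := by
      rw [hsw]
      exact List.drop_left' (by simp)
    have hew : (pr.reverse ++ wr.reverse).length + 1 - pr.length = wr.length + 1 := by
      simp; omega
    have htake2 : (((wr.reverse ++ [c]) ++ List.replicate t ' ').take (wr.length + 1))
        = wr.reverse ++ [c] := by
      exact List.take_left' (by simp)
    have hrem : input_str.toList.length - ((pr.reverse ++ wr.reverse).length + 1) - 1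
        = t - 1 := by
      rw [hlen]; omega
    -- A's second loop
    have h2a : aLoop2 input_str.toList.reverse 0 t (t + 1 + wr.length) []
        = aLoop2 (c :: (wr ++ pr)) t t (t + 1 + wr.length) (List.replicate (t - 1) ' ') := by
      rw [hrev, aLoop2_spaces t _ t (t + 1 + wr.length) (by omega) 0 [] (by omega)]
      simp
    have h2b : aLoop2 (c :: (wr ++ pr)) t t (t + 1 + wr.length) (List.replicate (t - 1) ' ')
        = aLoop2 (wr ++ pr) (t + 1) t (t + 1 + wr.length)
            ((List.replicate (t - 1) ' ' ++ [')', ' ']) ++ [c]) := by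
      rw [aLoop2]
      have c1 : (c == ' ' && t + 1 == t) = false := by simp
      have c2 : (t == t) = true := by simp
      simp only [c1, Bool.false_eq_true, if_false, c2, if_true]
    have h2c : aLoop2 (wr ++ pr) (t + 1) t (t + 1 + wr.length)
            ((List.replicate (t - 1) ' ' ++ [')', ' ']) ++ [c])
        = aLoop2 pr (t + 1 + wr.length) t (t + 1 + wr.length)
            ((((List.replicate (t - 1) ' ' ++ [')', ' ']) ++ [c]) ++ wr)) := by
      rw [aLoop2_mid wr pr t (t + 1 + wr.length) (t + 1) _ (by omega) (by omega)]
    cases pr with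
    | nil =>
      have haf : aLoop1 input_str.toList.reverse 0 none = some (some t, none) := by
        rw [ha2]; rfl
      have hlen' : input_str.toList.length = t + 1 + wr.length := by
        rw [hlen]; simp; omega
      have h2d : aLoop2 input_str.toList.reverse 0 t (t + 1 + wr.length) []
          = (((List.replicate (t - 1) ' ' ++ [')', ' ']) ++ [c]) ++ wr) := by
        rw [h2a, h2b, h2c]; rfl
      rw [hlen'] at he hrem
      unfold surround_previous_word surround_previous_word_alt
      simp only [haf, Option.getD_none, hlen', h2d, beq_self_eq_true, if_true]
      simp only [he, c0, Bool.false_eq_true, if_false, hg, hcd', hw, htake, hdrop, hew, htake2, hrem]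
      congr 1
      simp [List.reverse_append, List.reverse_replicate]
    | cons d pr' =>
      have hd := hpr d pr' rfl
      have haf : aLoop1 input_str.toList.reverse 0 none
          = some (some t, some (t + 1 + wr.length)) := by
        rw [ha2, aLoop1, if_pos hd]
      have hslen : ((t + 1 + wr.length : Nat) == input_str.toList.length) = false := by
        simp only [beq_eq_false_iff_ne, ne_eq, hlen]
        simp
        omega
      have h2d : aLoop2 input_str.toList.reverse 0 t (t + 1 + wr.length) []
          = ((((List.replicate (t - 1) ' ' ++ [')', ' ']) ++ [c]) ++ wr) ++ '(' :: d :: pr') := by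
        rw [h2a, h2b, h2c, aLoop2]
        have cx : ((t + 1 + wr.length + 1 : Nat) == t) = false := by simp; omega
        have c1 : (d == ' ' && t + 1 + wr.length + 1 == t) = false := by
          rw [cx, Bool.and_false]
        have c2 : (t + 1 + wr.length == t) = false := by simp; omega
        have c3 : ((t + 1 + wr.length : Nat) == t + 1 + wr.length) = true := by simp
        simp only [c1, Bool.false_eq_true, if_false, c2, c3, if_true]
        rw [aLoop2_after pr' t (t + 1 + wr.length) (t + 1 + wr.length + 1) _ (by omega) (by omega)]
        simp
      unfold surround_previous_word surround_previous_word_alt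
      simp only [haf, Option.getD_some, hslen, Bool.false_eq_true, if_false, h2d]
      simp only [he, c0, Bool.false_eq_true, if_false, hg, hcd', hw, htake, hdrop, hew, htake2, hrem]
      congr 1
      simp [List.reverse_append, List.reverse_replicate]
theorem ports_eq (input_str : String) :
    surround_previous_word input_str = surround_previous_word_alt input_str := by
  cases hdw : input_str.toList.reverse.dropWhile (fun x => x == ' ') with
  | nil =>
    apply core_allspace
    intro x hx
    have hx' : x ∈ input_str.toList.reverse := List.mem_reverse.mpr hx
    rw [← List.takeWhile_append_dropWhile (p := fun x => x == ' ')
        (l := input_str.toList.reverse), hdw, List.append_nil] at hx'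
    simpa using List.mem_takeWhile_imp hx'
  | cons c rest =>
    have hc2 : (c == ' ') = false := by
      have h := List.head_dropWhile_not (p := fun x => x == ' ')
        (l := input_str.toList.reverse) (by rw [hdw]; simp)
      simp only [hdw, List.head_cons] at h
      exact h
    set L := (input_str.toList.reverse.takeWhile (fun x => x == ' ')).length with hL
    have hsp : input_str.toList.reverse.takeWhile (fun x => x == ' ')
        = List.replicate L ' ' := by
      apply List.eq_replicate_of_mem
      intro b hb
      simpa using List.mem_takeWhile_imp hb
    have hsplit : input_str.toList.reverse
        = List.replicate L ' ' ++ (c :: rest) := by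
      conv_lhs => rw [← List.takeWhile_append_dropWhile (p := fun x => x == ' ')
        (l := input_str.toList.reverse), hdw]
      rw [← hsp]
    have hrest : rest = rest.takeWhile (fun x => !(pvDelims.contains x || x == ' '))
        ++ rest.dropWhile (fun x => !(pvDelims.contains x || x == ' ')) :=
      (List.takeWhile_append_dropWhile).symm
    apply core_main input_str L c
      (rest.takeWhile (fun x => !(pvDelims.contains x || x == ' ')))
      (rest.dropWhile (fun x => !(pvDelims.contains x || x == ' ')))
    · -- the decomposition of input_str.toList
      have := congrArg List.reverse hsplit
      rw [List.reverse_reverse] at this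
      rw [this]
      conv_lhs => rw [hrest]
      simp
      conv_rhs => rw [← List.append_assoc, ← List.reverse_append, List.takeWhile_append_dropWhile]
    · exact hc2
    · intro x hx
      have := List.mem_takeWhile_imp hx
      simpa using this
    · intro d pr' hpc
      have h := List.head_dropWhile_not
        (p := fun x => !(pvDelims.contains x || x == ' ')) (l := rest) (by rw [hpc]; simp)
      simp only [hpc, List.head_cons] at h
      simp at h
      by_cases hmem : d ∈ pvDelims
      · simp [hmem]
      · simp [hmem, h hmem]

-- ===== VERDICT (by name: the statement is the Claim_ definition above) =====
theorem surround_previous_word_spec : Claim_equal_surround_previous_word := by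
  intro input_str _
  unfold Spec_surround_previous_word
  exact ports_eq input_str
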